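-- pv_equiv track=rewrite | github.com/rbjones92/codewars | pick_peaks_solution.py | pick_peaks
-- ===== SOURCE A (Python) =====
-- def pick_peaks(arr):
--     peak, pos = [], []
--     res = { "peaks":[], "pos":[] }
--
--     for i in range(1, len(arr)) :
--         if arr[i]>arr[i-1] :
--             peak, pos = [arr[i]], [i]
--
--         elif arr[i]<arr[i-1] :
--             res["peaks"] += peak
--             res["pos"] += pos
--             peak, pos = [], []
--
--     return res
-- ===== SOURCE B (Python) =====
-- def pick_peaks(arr):
--     n = len(arr)
--     peaks, pos = [], []
--     i = 1
--     while i < n: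
--         if arr[i] > arr[i - 1]:
--             j = i + 1
--             while j < n and arr[j] == arr[i]:
--                 j += 1
--             if j < n and arr[j] < arr[i]:
--                 peaks.append(arr[i])
--                 pos.append(i)
--             i = j
--         else:
--             i += 1
--     return {"peaks": peaks, "pos": pos}
-- ===== Notes on version B (the rewrite author's own statement) =====
-- stated objective: alternative
-- what changed: Replaces A's retained one-element candidate state machine (set on rise, flushed into the result dict on fall) with an index walk that, on each rise, scans forward past the plateau of equal values and records the peak only when a strictly smaller element follows.
import Mathlib
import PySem

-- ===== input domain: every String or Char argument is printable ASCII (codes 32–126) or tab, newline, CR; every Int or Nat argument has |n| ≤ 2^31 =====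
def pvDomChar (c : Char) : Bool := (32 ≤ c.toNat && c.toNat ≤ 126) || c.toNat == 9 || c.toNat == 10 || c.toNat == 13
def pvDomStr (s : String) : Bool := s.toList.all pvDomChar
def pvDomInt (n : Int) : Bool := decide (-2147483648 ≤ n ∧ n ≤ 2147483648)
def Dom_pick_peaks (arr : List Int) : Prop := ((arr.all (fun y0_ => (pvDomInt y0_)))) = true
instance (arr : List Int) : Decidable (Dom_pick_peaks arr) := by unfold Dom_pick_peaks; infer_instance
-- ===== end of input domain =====

-- B replaces A's retained one-element candidate state machine by an index walk with a
-- forward plateau-consuming lookahead (alternative decomposition, same O(n) cost).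

-- ===== PORT A =====
-- A-side helper: the body of A's for-loop (state = ((peak, pos), res); res is the Python dict)
def pvStepA (arr : List Int) (st : (List Int × List Int) × PySem.Dict String (List Int)) (i : Int) :
    (List Int × List Int) × PySem.Dict String (List Int) :=
  if PySem.List.pyGetD arr i 0 > PySem.List.pyGetD arr (i - 1) 0 then
    (([PySem.List.pyGetD arr i 0], [i]), st.2)
  else if PySem.List.pyGetD arr i 0 < PySem.List.pyGetD arr (i - 1) 0 then
    (([], []),
      PySem.Dict.modify (PySem.Dict.modify st.2 "peaks" [] (· ++ st.1.1)) "pos" [] (· ++ st.1.2))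
  else st

def pick_peaks (arr : List Int) : List (String × List Int) :=
  ((PySem.List.pyRange 1 arr.length).foldl (pvStepA arr)
    (([], []), PySem.Dict.mk [("peaks", []), ("pos", [])])).2.items

-- ===== PORT B =====
-- B-side helper: the inner `while j < n and arr[j] == arr[i]` lookahead
def pbSkip (arr : List Int) (v : Int) (j : Nat) : Nat :=
  if h : j < arr.length ∧ arr.getD j 0 = v then pbSkip arr v (j + 1) else j
termination_by arr.length - j
decreasing_by omega

-- needed by pbLoop's termination proof (cited in its decreasing_by)
theorem pbSkip_ge (arr : List Int) (v : Int) (j : Nat) : j ≤ pbSkip arr v j := by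
  unfold pbSkip
  split
  · exact Nat.le_trans (Nat.le_succ j) (pbSkip_ge arr v (j + 1))
  · exact Nat.le_refl j
termination_by arr.length - j
decreasing_by omega

-- B's outer `while i < n` loop
def pbLoop (arr : List Int) (i : Nat) (peaks pos : List Int) : List Int × List Int :=
  if h : i < arr.length then
    if arr.getD i 0 > arr.getD (i - 1) 0 then
      let j := pbSkip arr (arr.getD i 0) (i + 1)
      if j < arr.length ∧ arr.getD j 0 < arr.getD i 0 then
        pbLoop arr j (peaks ++ [arr.getD i 0]) (pos ++ [(i : Int)])
      else pbLoop arr j peaks pos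
    else pbLoop arr (i + 1) peaks pos
  else (peaks, pos)
termination_by arr.length - i
decreasing_by
  · have := pbSkip_ge arr (arr.getD i 0) (i + 1); omega
  · have := pbSkip_ge arr (arr.getD i 0) (i + 1); omega
  · omega

def pick_peaks_alt (arr : List Int) : List (String × List Int) :=
  let r := pbLoop arr 1 [] []
  [("peaks", r.1), ("pos", r.2)]

-- ===== PRECONDITION & SPEC =====
def Spec_pick_peaks (arr : List Int) (out : List (String × List Int)) : Prop := out = pick_peaks_alt arr
instance (arr : List Int) (out : List (String × List Int)) : Decidable (Spec_pick_peaks arr out) := by unfold Spec_pick_peaks; infer_instance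

-- ===== CLAIM (what is proved, stated in full; the proofs are below) =====
def Claim_equal_pick_peaks : Prop := ∀ (arr : List Int), Dom_pick_peaks arr → Spec_pick_peaks arr (pick_peaks arr)

-- ===== LEMMAS AND PROOFS =====

-- the final dict, as a list, built from its two entries
def pvOut (r : List Int × List Int) : List (String × List Int) := [("peaks", r.1), ("pos", r.2)]

-- A's fold over range(i, n) started from candidate c and already-flushed lists P, Q
def pvFA (arr : List Int) (i : Nat) (c : List Int × List Int) (P Q : List Int) : List (String × List Int) :=
  ((PySem.List.pyRange (i : Int) (arr.length : Int)).foldl (pvStepA arr)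
    (c, PySem.Dict.mk [("peaks", P), ("pos", Q)])).2.items

theorem pvFlush (P Q X Y : List Int) :
    PySem.Dict.modify (PySem.Dict.modify (PySem.Dict.mk [("peaks", P), ("pos", Q)]) "peaks" [] (· ++ X)) "pos" [] (· ++ Y)
      = PySem.Dict.mk [("peaks", P ++ X), ("pos", Q ++ Y)] := by
  simp [PySem.Dict.modify, PySem.Dict.insert, PySem.Dict.getD, PySem.Dict.get?, PySem.Dict.contains]

theorem pvStepA_rise (arr : List Int) (i : Nat) (c : List Int × List Int) (d : PySem.Dict String (List Int))
    (h1 : 1 ≤ i) (hr : arr.getD (i - 1) 0 < arr.getD i 0) :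
    pvStepA arr (c, d) (i : Int) = (([arr.getD i 0], [(i : Int)]), d) := by
  unfold pvStepA
  dsimp only
  rw [show ((i : Int) - 1) = (((i - 1 : Nat)) : Int) by omega]
  simp only [PySem.List.pyGetD_natCast, gt_iff_lt]
  rw [if_pos hr]

theorem pvStepA_fall (arr : List Int) (i : Nat) (c : List Int × List Int) (P Q : List Int)
    (h1 : 1 ≤ i) (hf : arr.getD i 0 < arr.getD (i - 1) 0) :
    pvStepA arr (c, PySem.Dict.mk [("peaks", P), ("pos", Q)]) (i : Int)
      = (([], []), PySem.Dict.mk [("peaks", P ++ c.1), ("pos", Q ++ c.2)]) := by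
  unfold pvStepA
  dsimp only
  rw [show ((i : Int) - 1) = (((i - 1 : Nat)) : Int) by omega]
  simp only [PySem.List.pyGetD_natCast, gt_iff_lt]
  rw [if_neg (by omega), if_pos hf, pvFlush]

theorem pvStepA_eq (arr : List Int) (i : Nat) (st : (List Int × List Int) × PySem.Dict String (List Int))
    (h1 : 1 ≤ i) (he : arr.getD i 0 = arr.getD (i - 1) 0) :
    pvStepA arr st (i : Int) = st := by
  unfold pvStepA
  rw [show ((i : Int) - 1) = (((i - 1 : Nat)) : Int) by omega]
  simp only [PySem.List.pyGetD_natCast, gt_iff_lt]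
  rw [if_neg (by omega), if_neg (by omega)]

theorem pvFA_cons (arr : List Int) (i : Nat) (h : i < arr.length)
    (c : List Int × List Int) (P Q : List Int) (c' : List Int × List Int) (P' Q' : List Int)
    (hstep : pvStepA arr (c, PySem.Dict.mk [("peaks", P), ("pos", Q)]) (i : Int)
      = (c', PySem.Dict.mk [("peaks", P'), ("pos", Q')])) :
    pvFA arr i c P Q = pvFA arr (i + 1) c' P' Q' := by
  unfold pvFA
  rw [PySem.List.pyRange_one_cons (by exact_mod_cast h), List.foldl_cons, hstep,
    show ((i : Int) + 1) = (((i + 1 : Nat)) : Int) by push_cast; ring]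

theorem pv_term (arr : List Int) (i : Nat) (P Q : List Int) (hn : arr.length ≤ i) :
    (pvFA arr i ([], []) P Q = pvOut (pbLoop arr i P Q)) ∧
    (∀ v p, pvFA arr i ([v], [p]) P Q =
      if pbSkip arr v i < arr.length ∧ arr.getD (pbSkip arr v i) 0 < v then
        pvOut (pbLoop arr (pbSkip arr v i) (P ++ [v]) (Q ++ [p]))
      else pvOut (pbLoop arr (pbSkip arr v i) P Q)) := by
  have hrange : PySem.List.pyRange (i : Int) (arr.length : Int) = [] :=
    PySem.List.pyRange_one_eq_nil (by exact_mod_cast hn)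
  have hloop : pbLoop arr i P Q = (P, Q) := by
    unfold pbLoop; rw [dif_neg (by omega)]
  have hskip : ∀ v : Int, pbSkip arr v i = i := by
    intro v; unfold pbSkip; rw [dif_neg (by omega)]
  constructor
  · unfold pvFA; rw [hrange, hloop]; rfl
  · intro v p
    rw [hskip v, if_neg (by omega), hloop]
    unfold pvFA; rw [hrange]; rfl

theorem pv_main (arr : List Int) (k : Nat) : ∀ (i : Nat) (P Q : List Int),
    arr.length - i ≤ k → 1 ≤ i →
    (pvFA arr i ([], []) P Q = pvOut (pbLoop arr i P Q)) ∧
    (∀ v p, v = arr.getD (i - 1) 0 →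
      pvFA arr i ([v], [p]) P Q =
        if pbSkip arr v i < arr.length ∧ arr.getD (pbSkip arr v i) 0 < v then
          pvOut (pbLoop arr (pbSkip arr v i) (P ++ [v]) (Q ++ [p]))
        else pvOut (pbLoop arr (pbSkip arr v i) P Q)) := by
  induction k with
  | zero =>
    intro i P Q hk h1
    exact ⟨(pv_term arr i P Q (by omega)).1, fun v p _ => (pv_term arr i P Q (by omega)).2 v p⟩
  | succ k ih =>
    intro i P Q hk h1
    by_cases h : i < arr.length
    · have h1' : 1 ≤ i + 1 := by omega
      have hsub : i + 1 - 1 = i := by omega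
      constructor
      · -- no pending candidate at position i
        rcases lt_trichotomy (arr.getD (i - 1) 0) (arr.getD i 0) with hr | he | hf
        · -- rise: candidate becomes ([arr[i]], [i])
          rw [pvFA_cons arr i h _ P Q _ P Q (pvStepA_rise arr i _ _ h1 hr)]
          have h2 := ((ih (i + 1) P Q (by omega) h1').2 (arr.getD i 0) (i : Int)
            (by rw [hsub]))
          rw [h2]
          conv_rhs => rw [pbLoop]
          rw [dif_pos h, if_pos hr]
          simp only [apply_ite pvOut]
        · -- equal
          rw [pvFA_cons arr i h _ P Q _ P Q (pvStepA_eq arr i _ h1 he.symm)]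
          rw [(ih (i + 1) P Q (by omega) h1').1]
          conv_rhs => rw [pbLoop]
          rw [dif_pos h, if_neg (by omega)]
        · -- fall with empty candidate: flush appends nothing
          have hstep := pvStepA_fall arr i ([], []) P Q h1 hf
          simp only [List.append_nil] at hstep
          rw [pvFA_cons arr i h _ P Q _ P Q hstep]
          rw [(ih (i + 1) P Q (by omega) h1').1]
          conv_rhs => rw [pbLoop]
          rw [dif_pos h, if_neg (by omega)]
      · -- pending candidate ([v],[p]) with v = arr[i-1]
        intro v p hv
        rcases lt_trichotomy (arr.getD i 0) v with hf | he | hr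
        · -- fall: flush (v, p)
          have hstep := pvStepA_fall arr i ([v], [p]) P Q h1 (hv ▸ hf)
          rw [pvFA_cons arr i h _ P Q _ _ _ hstep]
          rw [(ih (i + 1) (P ++ [v]) (Q ++ [p]) (by omega) h1').1]
          have hskip : pbSkip arr v i = i := by
            unfold pbSkip; rw [dif_neg (by intro hc; omega)]
          rw [hskip, if_pos ⟨h, hf⟩]
          conv_rhs => rw [pbLoop]
          rw [dif_pos h, if_neg (by omega)]
        · -- plateau: state unchanged, skip advances
          rw [pvFA_cons arr i h _ P Q _ P Q (pvStepA_eq arr i _ h1 (by rw [he, hv]))]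
          have h2 := ((ih (i + 1) P Q (by omega) h1').2 v p (by rw [hsub, ← he]))
          rw [h2]
          have hskip : pbSkip arr v i = pbSkip arr v (i + 1) := by
            conv_lhs => rw [pbSkip]
            rw [dif_pos ⟨h, he⟩]
          rw [hskip]
        · -- rise: candidate replaced by ([arr[i]], [i]); skip stops, no record
          rw [pvFA_cons arr i h _ P Q _ P Q (pvStepA_rise arr i _ _ h1 (by omega))]
          have hskip : pbSkip arr v i = i := by
            unfold pbSkip; rw [dif_neg (by intro hc; omega)]
          have hc : ¬(i < arr.length ∧ arr.getD i 0 < v) := by intro hc; omega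
          rw [hskip, if_neg hc]
          conv_rhs => rw [pbLoop]
          rw [dif_pos h, if_pos (show arr.getD i 0 > arr.getD (i - 1) 0 by omega)]
          simp only [apply_ite pvOut]
          exact (ih (i + 1) P Q (by omega) h1').2 (arr.getD i 0) (i : Int) (by rw [hsub])
    · exact ⟨(pv_term arr i P Q (by omega)).1, fun v p _ => (pv_term arr i P Q (by omega)).2 v p⟩

-- ===== VERDICT (by name: the statement is the Claim_ definition above) =====
theorem pick_peaks_spec : Claim_equal_pick_peaks := by
  intro arr _
  have h := (pv_main arr arr.length 1 [] [] (by omega) (Nat.le_refl 1)).1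
  unfold pvFA pvOut at h
  simp only [Nat.cast_one] at h
  show pick_peaks arr = pick_peaks_alt arr
  unfold pick_peaks pick_peaks_alt
  rw [h]
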